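-- pv_equiv track=rewrite | github.com/rrazban/percolating_brain | simulation/standard_graphs/preferential_attachment.py | setup_edges
-- ===== SOURCE A (Python) =====
-- import itertools
--
-- def setup_edges(n):
--     edges=itertools.combinations(range(n),2)
--     edges = list(edges)
--
--     edge_per_node = [[] for _ in range(n)]
--     for e in edges:
--         ind1=e[0]
--         ind2=e[1]
--         edge_per_node[ind1].append(e)
--         edge_per_node[ind2].append((ind2, ind1))
--     return edge_per_node
-- ===== SOURCE B (Python) =====
-- def setup_edges(n):
--     return [[(i, j) for j in range(n) if j != i] for i in range(n)]
-- ===== Notes on version B (the rewrite author's own statement) =====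
-- stated objective: simpler
-- what changed: Replaces the itertools.combinations pair enumeration plus the scatter loop that appends each pair into two buckets with a direct per-node comprehension building each adjacency list independently.
import Mathlib
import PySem

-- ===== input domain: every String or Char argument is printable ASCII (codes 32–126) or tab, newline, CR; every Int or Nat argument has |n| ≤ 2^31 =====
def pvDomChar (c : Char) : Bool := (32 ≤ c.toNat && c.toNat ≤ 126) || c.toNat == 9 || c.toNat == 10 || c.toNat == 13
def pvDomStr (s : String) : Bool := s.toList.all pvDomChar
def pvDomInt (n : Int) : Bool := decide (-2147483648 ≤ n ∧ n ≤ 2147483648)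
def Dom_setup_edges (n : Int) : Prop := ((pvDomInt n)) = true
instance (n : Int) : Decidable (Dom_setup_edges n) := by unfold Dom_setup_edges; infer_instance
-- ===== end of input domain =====

-- B builds each node's adjacency list directly with one comprehension instead of A's
-- itertools.combinations enumeration plus a scatter loop into two buckets per pair (objective: simpler).

-- ===== PORT A =====
-- itertools.combinations(range(n), 2): all pairs (i, j) with 0 ≤ i < j < n, lexicographic
-- (library call, ported as the corresponding nested enumeration; exact for this argument shape)
def pvCombos (m : Nat) : List (Int × Int) :=
  (List.range m).flatMap (fun (i : Nat) =>
    (List.range m).filterMap (fun (j : Nat) => if i < j then some ((i : Int), (j : Int)) else none))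

-- one iteration of A's loop body: edge_per_node[ind1].append(e); edge_per_node[ind2].append((ind2, ind1))
-- (the indices produced by combinations are 0 ≤ ind < n, so .toNat indexing is exact here)
def pvScatter (st : List (List (Int × Int))) (e : Int × Int) : List (List (Int × Int)) :=
  let st1 := st.modify e.1.toNat (fun l => l ++ [e])
  st1.modify e.2.toNat (fun l => l ++ [(e.2, e.1)])

def setup_edges (n : Int) : List (List (Int × Int)) :=
  (pvCombos n.toNat).foldl pvScatter (List.replicate n.toNat [])

-- ===== PORT B =====
def setup_edges_alt (n : Int) : List (List (Int × Int)) :=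
  (PySem.List.pyRange 0 n 1).map (fun i =>
    (PySem.List.pyRange 0 n 1).filterMap (fun j => if j ≠ i then some (i, j) else none))

-- ===== PRECONDITION & SPEC =====
def Spec_setup_edges (n : Int) (out : List (List (Int × Int))) : Prop := out = setup_edges_alt n
instance (n : Int) (out : List (List (Int × Int))) : Decidable (Spec_setup_edges n out) := by unfold Spec_setup_edges; infer_instance

-- ===== CLAIM (what is proved, stated in full; the proofs are below) =====
def Claim_equal_setup_edges : Prop := ∀ (n : Int), Dom_setup_edges n → Spec_setup_edges n (setup_edges n)

-- ===== LEMMAS AND PROOFS =====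

-- what one edge contributes to bucket k
def pvContribE (k : Nat) (e : Int × Int) : List (Int × Int) :=
  (if e.1.toNat = k then [e] else []) ++ (if e.2.toNat = k then [(e.2, e.1)] else [])

-- the canonical form of node k's finished bucket (neighbours j ≠ k in increasing order)
def pvBucket (m k : Nat) : List (Int × Int) :=
  ((List.range m).filter (fun j => decide (j ≠ k))).map (fun (j : Nat) => ((k : Int), (j : Int)))

theorem pvScatter_getElem? (st : List (List (Int × Int))) (e : Int × Int) (k : Nat) :
    (pvScatter st e)[k]? = st[k]?.map (fun l => l ++ pvContribE k e) := by
  unfold pvScatter pvContribE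
  simp only [List.getElem?_modify]
  cases st[k]? with
  | none => simp
  | some l =>
    simp only [Option.map_some]
    by_cases h1 : e.1.toNat = k <;> by_cases h2 : e.2.toNat = k <;> simp [h1, h2]

theorem pvFold_getElem? (es : List (Int × Int)) (st : List (List (Int × Int))) (k : Nat) :
    (es.foldl pvScatter st)[k]? = st[k]?.map (fun l => l ++ es.flatMap (pvContribE k)) := by
  induction es generalizing st with
  | nil => simp
  | cons e es ih =>
    rw [List.foldl_cons, ih, pvScatter_getElem?]
    cases st[k]? <;> simp

theorem pvFilterMap_if {α β : Type} (l : List α) (p : α → Prop) [DecidablePred p] (f : α → β) :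
    l.filterMap (fun a => if p a then some (f a) else none)
      = (l.filter (fun a => decide (p a))).map f := by
  induction l with
  | nil => rfl
  | cons a l ih => by_cases h : p a <;> simp [h, ih]

theorem pvFlatMap_congr {α β : Type} (l : List α) (f g : α → List β)
    (h : ∀ a ∈ l, f a = g a) : l.flatMap f = l.flatMap g := by
  induction l with
  | nil => rfl
  | cons a l ih =>
    simp only [List.flatMap_cons]
    rw [h a (by simp), ih (fun a ha => h a (by simp [ha]))]

theorem pvFlatMap_map {α β : Type} (l : List α) (f : α → β) :
    l.flatMap (fun a => [f a]) = l.map f := by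
  induction l with
  | nil => rfl
  | cons a l ih => simp [ih]

theorem pvFlatMap_single {β : Type} (c : List β) (k : Nat) (l : List Nat)
    (hl : l.Nodup) (hk : k ∈ l) :
    l.flatMap (fun j => if j = k then c else []) = c := by
  induction l with
  | nil => cases hk
  | cons a l ih =>
    by_cases hak : a = k
    · subst hak
      have hnil : ∀ x ∈ l, (if x = a then c else []) = ([] : List β) := by
        intro x hx
        have hxa : x ≠ a := by
          intro h
          exact (List.nodup_cons.mp hl).1 (h ▸ hx)
        simp [hxa]
      rw [List.flatMap_cons, if_pos rfl, List.flatMap_eq_nil_iff.mpr hnil, List.append_nil]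
    · have hk' : k ∈ l := by
        rcases List.mem_cons.mp hk with h | h
        · exact absurd h.symm hak
        · exact h
      simp only [List.flatMap_cons, if_neg hak, List.nil_append]
      exact ih (List.nodup_cons.mp hl).2 hk'

-- bucket k's total contribution from block i of the combinations list
theorem pvInner_block (m i k : Nat) (hk : k < m) :
    ((List.range m).filterMap
        (fun (j : Nat) => if i < j then some ((i : Int), (j : Int)) else none)).flatMap (pvContribE k)
      = if i < k then [((k : Int), (i : Int))]
        else if i = k then
          ((List.range m).filter (fun j => decide (k < j))).map (fun (j : Nat) => ((k : Int), (j : Int)))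
        else [] := by
  rw [pvFilterMap_if, List.flatMap_map]
  rcases lt_trichotomy i k with hik | rfl | hik
  · rw [if_pos hik]
    have hcong : ((List.range m).filter (fun j => decide (i < j))).flatMap
        (fun (j : Nat) => pvContribE k ((i : Int), (j : Int)))
        = ((List.range m).filter (fun j => decide (i < j))).flatMap
        (fun (j : Nat) => if j = k then [((k : Int), (i : Int))] else []) := by
      apply pvFlatMap_congr
      intro j hj
      have hine : i ≠ k := Nat.ne_of_lt hik
      unfold pvContribE
      by_cases hjk : j = k <;> simp [hjk, hine]
    rw [hcong]
    exact pvFlatMap_single _ _ _ ((List.nodup_range).filter _)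
      (by simp [List.mem_filter, hik, hk])
  · rw [if_neg (lt_irrefl i), if_pos rfl]
    have hcong : ((List.range m).filter (fun j => decide (i < j))).flatMap
        (fun (j : Nat) => pvContribE i ((i : Int), (j : Int)))
        = ((List.range m).filter (fun j => decide (i < j))).flatMap
        (fun (j : Nat) => [(((i : Nat) : Int), ((j : Nat) : Int))]) := by
      apply pvFlatMap_congr
      intro j hj
      have hij : i < j := by simpa using (List.mem_filter.mp hj).2
      have hji : j ≠ i := Nat.ne_of_gt hij
      unfold pvContribE
      simp [hji]
    rw [hcong, pvFlatMap_map]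
  · rw [if_neg (Nat.lt_asymm hik), if_neg (Nat.ne_of_gt hik)]
    rw [List.flatMap_eq_nil_iff]
    intro j hj
    have hij : i < j := by simpa using (List.mem_filter.mp hj).2
    have h1 : i ≠ k := Nat.ne_of_gt hik
    have h2 : j ≠ k := Nat.ne_of_gt (Nat.lt_trans hik hij)
    unfold pvContribE
    simp [h1, h2]

-- range m split at k (k < m)
theorem pvRange_split (m k : Nat) (hk : k < m) :
    List.range m = List.range k ++ [k] ++ (List.range (m - (k + 1))).map (fun x => k + 1 + x) := by
  have hm : m = (k + 1) + (m - (k + 1)) := by omega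
  conv_lhs => rw [hm, List.range_add, List.range_succ]

-- summing the per-block contributions: blocks before k give one pair each, block k gives C, the rest nothing
theorem pvOuter (m k : Nat) (hk : k < m) (C : List (Int × Int)) :
    (List.range m).flatMap
        (fun (i : Nat) => if i < k then [((k : Int), (i : Int))] else if i = k then C else [])
      = (List.range k).map (fun (i : Nat) => ((k : Int), (i : Int))) ++ C := by
  rw [pvRange_split m k hk]
  rw [List.flatMap_append, List.flatMap_append, List.flatMap_map]
  have h1 : (List.range k).flatMap
      (fun (i : Nat) => if i < k then [((k : Int), (i : Int))] else if i = k then C else [])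
      = (List.range k).map (fun (i : Nat) => ((k : Int), (i : Int))) := by
    rw [← pvFlatMap_map (List.range k) (fun (i : Nat) => (((k : Int), (i : Int)) : Int × Int))]
    apply pvFlatMap_congr
    intro i hi
    have : i < k := List.mem_range.mp hi
    simp [this]
  have h3 : (List.range (m - (k + 1))).flatMap
      (fun (x : Nat) => if k + 1 + x < k then [((k : Int), ((k + 1 + x : Nat) : Int))]
        else if k + 1 + x = k then C else []) = [] := by
    rw [List.flatMap_eq_nil_iff]
    intro x _
    have h4 : ¬ (k + 1 + x < k) := by omega
    have h5 : ¬ (k + 1 + x = k) := by omega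
    simp [h4, h5]
  rw [h1, h3, List.append_nil]
  simp

-- the elements above k of range m
theorem pvFilter_gt (m k : Nat) (hk : k < m) :
    (List.range m).filter (fun j => decide (k < j))
      = (List.range (m - (k + 1))).map (fun x => k + 1 + x) := by
  rw [pvRange_split m k hk, List.filter_append, List.filter_append, List.filter_map]
  have s1 : (List.range k).filter (fun j => decide (k < j)) = [] := by
    rw [List.filter_eq_nil_iff]
    intro j hj
    have : j < k := List.mem_range.mp hj
    simp
    omega
  have s3 : (List.range (m - (k + 1))).filter ((fun j => decide (k < j)) ∘ (fun x => k + 1 + x))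
      = List.range (m - (k + 1)) := by
    rw [List.filter_eq_self]
    intro j _
    simp [Function.comp]
    omega
  rw [s1, s3]
  simp

-- the elements of range m other than k
theorem pvFilter_ne (m k : Nat) (hk : k < m) :
    (List.range m).filter (fun j => decide (j ≠ k))
      = List.range k ++ (List.range (m - (k + 1))).map (fun x => k + 1 + x) := by
  rw [pvRange_split m k hk, List.filter_append, List.filter_append, List.filter_map]
  have r1 : (List.range k).filter (fun j => decide (j ≠ k)) = List.range k := by
    rw [List.filter_eq_self]
    intro j hj
    have : j < k := List.mem_range.mp hj
    simp
    omega
  have r3 : (List.range (m - (k + 1))).filter ((fun j => decide (j ≠ k)) ∘ (fun x => k + 1 + x))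
      = List.range (m - (k + 1)) := by
    rw [List.filter_eq_self]
    intro j _
    simp [Function.comp]
    omega
  rw [r1, r3]
  simp

theorem pvBucket_eq (m k : Nat) (hk : k < m) :
    (pvCombos m).flatMap (pvContribE k) = pvBucket m k := by
  unfold pvCombos pvBucket
  rw [List.flatMap_assoc]
  have hcong : (List.range m).flatMap
      (fun (i : Nat) => ((List.range m).filterMap
        (fun (j : Nat) => if i < j then some ((i : Int), (j : Int)) else none)).flatMap (pvContribE k))
      = (List.range m).flatMap
      (fun (i : Nat) => if i < k then [((k : Int), (i : Int))]
        else if i = k then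
          ((List.range m).filter (fun j => decide (k < j))).map (fun (j : Nat) => ((k : Int), (j : Int)))
        else []) := by
    apply pvFlatMap_congr
    intro i _
    exact pvInner_block m i k hk
  rw [hcong, pvOuter m k hk, pvFilter_ne m k hk, pvFilter_gt m k hk, List.map_append]

-- B's bucket in the same canonical form
theorem pvAlt_core (k : Nat) (l : List Nat) :
    l.filterMap (fun (j : Nat) =>
        if ((j : Int)) ≠ ((k : Int)) then some (((k : Int)), ((j : Int))) else none)
      = (l.filter (fun j => decide (j ≠ k))).map (fun (j : Nat) => ((k : Int), (j : Int))) := by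
  induction l with
  | nil => rfl
  | cons a l ih =>
    by_cases h : a = k
    · rw [List.filterMap_cons_none (by simp [h]), ih, List.filter_cons_of_neg (by simp [h])]
    · have hs : (fun (j : Nat) =>
          if ((j : Int)) ≠ ((k : Int)) then some (((k : Int)), ((j : Int))) else none) a
            = some (((k : Int)), ((a : Int))) := by simp [h]
      rw [List.filterMap_cons_some (f := fun (j : Nat) =>
          if ((j : Int)) ≠ ((k : Int)) then some (((k : Int)), ((j : Int))) else none) hs, ih, List.filter_cons_of_pos (by simp [h]), List.map_cons]

theorem pvAlt_getElem? (n : Int) (k : Nat) :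
    (setup_edges_alt n)[k]? = if k < n.toNat then some (pvBucket n.toNat k) else none := by
  unfold setup_edges_alt pvBucket
  rw [PySem.List.pyRange_one]
  have hn : (n - 0).toNat = n.toNat := by omega
  rw [hn]
  simp only [zero_add]
  rw [List.getElem?_map, List.getElem?_map]
  by_cases hk : k < n.toNat
  · rw [List.getElem?_range hk, if_pos hk]
    simp only [Option.map_some]
    rw [List.filterMap_map]
    exact congrArg some (pvAlt_core k (List.range n.toNat))
  · rw [if_neg hk, List.getElem?_eq_none (by simpa using Nat.le_of_not_lt hk)]
    rfl

-- ===== VERDICT (by name: the statement is the Claim_ definition above) =====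
theorem setup_edges_spec : Claim_equal_setup_edges := by
  intro n _
  unfold Spec_setup_edges
  apply List.ext_getElem?
  intro k
  rw [pvAlt_getElem?]
  unfold setup_edges
  rw [pvFold_getElem?, List.getElem?_replicate]
  by_cases hk : k < n.toNat
  · rw [if_pos hk, if_pos hk, Option.map_some, List.nil_append, pvBucket_eq n.toNat k hk]
  · rw [if_neg hk, if_neg hk, Option.map_none]
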